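-- pv_equiv track=rewrite | github.com/AdroMine/AdventOfCode | 2015/Day06/d6_solution.py | d6_p2
-- ===== SOURCE A (Python) =====
-- from typing import List, DefaultDict
-- from collections import defaultdict
--
-- def d6_p2(input) -> int:
--     grid: DefaultDict = defaultdict(int)
--
--     for inst, x1, y1, x2, y2 in input:
--         for r in range(x1, x2+1):
--             for c in range(y1, y2+1):
--                 match inst:
--                     case 'toggle':
--                         grid[(r,c)] += 2
--                     case 'turn on':
--                         grid[(r,c)] += 1
--                     case 'turn off':
--                         if grid[(r,c)] > 0:
--                             grid[(r,c)] -= 1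
--
--     return sum(grid.values())
-- ===== SOURCE B (Python) =====
-- def d6_p2(input) -> int:
--     # coordinate compression: split the plane into uniform blocks, simulate
--     # one representative cell per block, weight its brightness by block area
--     xs = sorted({x1 for _, x1, _, _, _ in input} | {x2 + 1 for _, _, _, x2, _ in input})
--     ys = sorted({y1 for _, _, y1, _, _ in input} | {y2 + 1 for _, _, _, _, y2 in input})
--     total = 0
--     for i in range(len(xs) - 1):
--         for j in range(len(ys) - 1):
--             v = 0
--             for inst, x1, y1, x2, y2 in input:
--                 if x1 <= xs[i] <= x2 and y1 <= ys[j] <= y2: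
--                     if inst == 'toggle':
--                         v += 2
--                     elif inst == 'turn on':
--                         v += 1
--                     elif inst == 'turn off' and v > 0:
--                         v -= 1
--             total += v * (xs[i + 1] - xs[i]) * (ys[j + 1] - ys[j])
--     return total
-- ===== Notes on version B (the rewrite author's own statement) =====
-- stated objective: alternative
-- what changed: B uses coordinate compression: it sorts the distinct rectangle edge coordinates, simulates one representative cell per uniform block and weights its final brightness by the block area, instead of A's per-cell simulation of every cell of every rectangle in a defaultdict grid; this trades A's dependence on total rectangle area for a dependence on the number of distinct coordinates.
import Mathlib
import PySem

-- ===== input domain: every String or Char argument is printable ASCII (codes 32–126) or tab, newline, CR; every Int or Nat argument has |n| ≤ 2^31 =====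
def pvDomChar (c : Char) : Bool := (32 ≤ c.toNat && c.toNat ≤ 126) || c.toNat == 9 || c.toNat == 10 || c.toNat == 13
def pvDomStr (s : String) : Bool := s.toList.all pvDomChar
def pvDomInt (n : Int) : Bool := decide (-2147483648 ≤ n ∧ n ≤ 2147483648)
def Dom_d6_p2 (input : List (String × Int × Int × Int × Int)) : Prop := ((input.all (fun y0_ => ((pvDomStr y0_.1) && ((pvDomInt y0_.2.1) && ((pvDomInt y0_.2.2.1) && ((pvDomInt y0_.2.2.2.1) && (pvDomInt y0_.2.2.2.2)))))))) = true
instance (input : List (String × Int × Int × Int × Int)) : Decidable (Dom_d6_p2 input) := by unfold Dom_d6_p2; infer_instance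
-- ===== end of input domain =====

-- B replaces A's per-cell grid simulation by coordinate compression (simulate one representative
-- cell per uniform block, weight its brightness by the block area): an alternative algorithm whose
-- cost depends on the number of distinct edge coordinates instead of the total rectangle area.

-- ===== PORT A =====
-- The grid dict is ported as Std.HashMap (a hash map, like Python's dict). Python's dict
-- iteration order is irrelevant to A's result: the only read of the whole grid is the
-- commutative sum of its values.
-- one instruction applied to the defaultdict grid: the two nested range loops with the match inside
def pvStepA (grid : Std.HashMap (Int × Int) Int) (t : String × Int × Int × Int × Int) :
    Std.HashMap (Int × Int) Int :=
  match t with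
  | (inst, x1, y1, x2, y2) =>
    (PySem.List.pyRange x1 (x2 + 1) 1).foldl (fun grid r =>
      (PySem.List.pyRange y1 (y2 + 1) 1).foldl (fun grid c =>
        if inst = "toggle" then grid.insert (r, c) (grid.getD (r, c) 0 + 2)
        else if inst = "turn on" then grid.insert (r, c) (grid.getD (r, c) 0 + 1)
        else if inst = "turn off" then
          -- defaultdict: grid[(r,c)] reads 0 for an absent key; the value is stored back
          grid.insert (r, c) (if grid.getD (r, c) 0 > 0 then grid.getD (r, c) 0 - 1
                              else grid.getD (r, c) 0)
        else grid) grid) grid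

def d6_p2 (input : List (String × Int × Int × Int × Int)) : Int :=
  -- sum(grid.values()): Python's sum is a left fold over the stored values
  (input.foldl pvStepA (∅ : Std.HashMap (Int × Int) Int)).fold (fun acc _ v => acc + v) 0

-- ===== PORT B =====
-- the body of B's innermost loop: one instruction applied to the brightness of one cell
def pvStepC (cell : Int × Int) (v : Int) (t : String × Int × Int × Int × Int) : Int :=
  match t with
  | (inst, x1, y1, x2, y2) =>
    if x1 ≤ cell.1 ∧ cell.1 ≤ x2 ∧ y1 ≤ cell.2 ∧ cell.2 ≤ y2 then
      if inst = "toggle" then v + 2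
      else if inst = "turn on" then v + 1
      else if inst = "turn off" ∧ v > 0 then v - 1
      else v
    else v

-- B's inner loop: final brightness of one representative cell
def pvValue (cell : Int × Int) (input : List (String × Int × Int × Int × Int)) : Int :=
  input.foldl (pvStepC cell) 0

-- xs = sorted({x1 …} | {x2+1 …}); ys = sorted({y1 …} | {y2+1 …})
def pvXs (input : List (String × Int × Int × Int × Int)) : List Int :=
  PySem.List.sorted
    (PySem.Set.union (PySem.Set.ofList (input.map (fun t => t.2.1)))
      (PySem.Set.ofList (input.map (fun t => t.2.2.2.1 + 1)))) (fun x => x) false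

def pvYs (input : List (String × Int × Int × Int × Int)) : List Int :=
  PySem.List.sorted
    (PySem.Set.union (PySem.Set.ofList (input.map (fun t => t.2.2.1)))
      (PySem.Set.ofList (input.map (fun t => t.2.2.2.2 + 1)))) (fun x => x) false

def d6_p2_alt (input : List (String × Int × Int × Int × Int)) : Int :=
  let xs := pvXs input
  let ys := pvYs input
  (PySem.List.pyRange 0 (PySem.List.len xs - 1) 1).foldl (fun total i =>
    (PySem.List.pyRange 0 (PySem.List.len ys - 1) 1).foldl (fun total j =>
      let v := pvValue (PySem.List.pyGetD xs i 0, PySem.List.pyGetD ys j 0) input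
      total + v * (PySem.List.pyGetD xs (i + 1) 0 - PySem.List.pyGetD xs i 0)
                * (PySem.List.pyGetD ys (j + 1) 0 - PySem.List.pyGetD ys j 0)) total) 0

-- ===== PRECONDITION & SPEC =====
def Spec_d6_p2 (input : List (String × Int × Int × Int × Int)) (out : Int) : Prop := out = d6_p2_alt input
instance (input : List (String × Int × Int × Int × Int)) (out : Int) : Decidable (Spec_d6_p2 input out) := by unfold Spec_d6_p2; infer_instance

-- ===== CLAIM (what is proved, stated in full; the proofs are below) =====
def Claim_equal_d6_p2 : Prop := ∀ (input : List (String × Int × Int × Int × Int)), Dom_d6_p2 input → Spec_d6_p2 input (d6_p2 input)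

-- ===== LEMMAS AND PROOFS =====

-- instruction t touches cell: recognized opcode and cell inside its rectangle
def pvTouch (t : String × Int × Int × Int × Int) (cell : Int × Int) : Prop :=
  (t.1 = "toggle" ∨ t.1 = "turn on" ∨ t.1 = "turn off") ∧
    t.2.1 ≤ cell.1 ∧ cell.1 ≤ t.2.2.2.1 ∧ t.2.2.1 ≤ cell.2 ∧ cell.2 ≤ t.2.2.2.2

-- the uniform shape of A's nested rectangle update, g the per-cell change
def pvNested (g : Int → Int) (x1 y1 x2 y2 : Int) (d : Std.HashMap (Int × Int) Int) :
    Std.HashMap (Int × Int) Int :=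
  (PySem.List.pyRange x1 (x2 + 1) 1).foldl (fun d r =>
    (PySem.List.pyRange y1 (y2 + 1) 1).foldl
      (fun d c => d.insert (r, c) (g (d.getD (r, c) 0))) d) d

-- DecidableEq-phrased wrappers around the Std.HashMap lemmas
theorem pv_getD_ins (m : Std.HashMap (Int × Int) Int) (k a : Int × Int) (v : Int) :
    (m.insert k v).getD a 0 = if a = k then v else m.getD a 0 := by
  rw [Std.HashMap.getD_insert]
  simp only [beq_iff_eq]
  exact if_congr eq_comm rfl rfl

theorem pv_mem_ins (m : Std.HashMap (Int × Int) Int) (k a : Int × Int) (v : Int) :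
    a ∈ m.insert k v ↔ a = k ∨ a ∈ m := by
  rw [Std.HashMap.mem_insert]
  simp only [beq_iff_eq]
  exact or_congr eq_comm Iff.rfl

theorem pv_nodup_keys (m : Std.HashMap (Int × Int) Int) : m.keys.Nodup := by
  have h := @Std.HashMap.distinct_keys _ _ _ _ m _ _
  exact List.Pairwise.imp (by intro a b hab; simpa using hab) h

theorem pv_stepA_eq (inst : String) (x1 y1 x2 y2 : Int) (d : Std.HashMap (Int × Int) Int) :
    pvStepA d (inst, x1, y1, x2, y2) =
      if inst = "toggle" then pvNested (fun v => v + 2) x1 y1 x2 y2 d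
      else if inst = "turn on" then pvNested (fun v => v + 1) x1 y1 x2 y2 d
      else if inst = "turn off" then
        pvNested (fun v => if v > 0 then v - 1 else v) x1 y1 x2 y2 d
      else d := by
  by_cases h1 : inst = "toggle"
  · subst h1; simp [pvStepA, pvNested]
  · by_cases h2 : inst = "turn on"
    · subst h2; simp [pvStepA, pvNested]
    · by_cases h3 : inst = "turn off"
      · subst h3; simp [pvStepA, pvNested]
      · simp only [pvStepA, h1, h2, h3, if_false]
        simp

-- getD through the inner column loop (uniform per-cell update g)
theorem pv_getD_inner (g : Int → Int) (cols : List Int) (hc : cols.Nodup) (r : Int)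
    (d : Std.HashMap (Int × Int) Int) (cell : Int × Int) :
    (cols.foldl (fun d c => d.insert (r, c) (g (d.getD (r, c) 0))) d).getD cell 0 =
      if cell.1 = r ∧ cell.2 ∈ cols then g (d.getD cell 0) else d.getD cell 0 := by
  induction cols generalizing d with
  | nil => simp
  | cons c cs ih =>
    simp only [List.foldl_cons]
    rcases List.nodup_cons.mp hc with ⟨hcn, hcs⟩
    rw [ih hcs]
    simp only [pv_getD_ins, List.mem_cons]
    by_cases hcell : cell = (r, c)
    · subst hcell
      simp [hcn]
    · rw [Prod.ext_iff] at hcell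
      push Not at hcell
      simp only [if_neg (show ¬ (cell = (r, c)) by rw [Prod.ext_iff]; push Not; exact hcell)]
      split_ifs with h1 h2 <;> first | rfl | (exfalso; tauto)

-- getD through the whole rectangle
theorem pv_getD_nested (g : Int → Int) (x1 y1 x2 y2 : Int)
    (d : Std.HashMap (Int × Int) Int) (cell : Int × Int) :
    (pvNested g x1 y1 x2 y2 d).getD cell 0 =
      if x1 ≤ cell.1 ∧ cell.1 ≤ x2 ∧ y1 ≤ cell.2 ∧ cell.2 ≤ y2 then g (d.getD cell 0)
      else d.getD cell 0 := by
  unfold pvNested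
  have hmain : ∀ (rows : List Int), rows.Nodup → ∀ (d : Std.HashMap (Int × Int) Int),
      (rows.foldl (fun d r => (PySem.List.pyRange y1 (y2 + 1) 1).foldl
          (fun d c => d.insert (r, c) (g (d.getD (r, c) 0))) d) d).getD cell 0 =
        if cell.1 ∈ rows ∧ cell.2 ∈ PySem.List.pyRange y1 (y2 + 1) 1 then g (d.getD cell 0)
        else d.getD cell 0 := by
    intro rows hr
    induction rows with
    | nil => simp
    | cons r rs ih =>
      intro d
      simp only [List.foldl_cons]
      rcases List.nodup_cons.mp hr with ⟨hrn, hrs⟩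
      rw [ih hrs, pv_getD_inner g _ (PySem.List.nodup_pyRange_one _ _) r d cell]
      simp only [List.mem_cons]
      by_cases h1 : cell.1 = r
      · subst h1
        simp [hrn]
      · split_ifs with h2 h3 <;> first | rfl | (exfalso; tauto)
  rw [hmain _ (PySem.List.nodup_pyRange_one _ _) d]
  simp only [PySem.List.mem_pyRange_one]
  exact if_congr (by omega) rfl rfl

-- membership through the rectangle
theorem pv_mem_inner (g : Int → Int) (cols : List Int) (r : Int)
    (d : Std.HashMap (Int × Int) Int) (cell : Int × Int) :
    (cell ∈ cols.foldl (fun d c => d.insert (r, c) (g (d.getD (r, c) 0))) d) ↔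
      cell ∈ d ∨ (cell.1 = r ∧ cell.2 ∈ cols) := by
  induction cols generalizing d with
  | nil => simp
  | cons c cs ih =>
    simp only [List.foldl_cons, ih, pv_mem_ins, List.mem_cons, Prod.ext_iff]
    tauto

theorem pv_mem_nested (g : Int → Int) (x1 y1 x2 y2 : Int)
    (d : Std.HashMap (Int × Int) Int) (cell : Int × Int) :
    (cell ∈ pvNested g x1 y1 x2 y2 d) ↔
      cell ∈ d ∨ (x1 ≤ cell.1 ∧ cell.1 ≤ x2 ∧ y1 ≤ cell.2 ∧ cell.2 ≤ y2) := by
  unfold pvNested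
  have hmain : ∀ (rows : List Int) (d : Std.HashMap (Int × Int) Int),
      (cell ∈ rows.foldl (fun d r => (PySem.List.pyRange y1 (y2 + 1) 1).foldl
          (fun d c => d.insert (r, c) (g (d.getD (r, c) 0))) d) d) ↔
        cell ∈ d ∨ (cell.1 ∈ rows ∧ cell.2 ∈ PySem.List.pyRange y1 (y2 + 1) 1) := by
    intro rows
    induction rows with
    | nil => simp
    | cons r rs ih =>
      intro d
      simp only [List.foldl_cons, ih, pv_mem_inner, List.mem_cons]
      tauto
  rw [hmain]
  simp only [PySem.List.mem_pyRange_one]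
  exact or_congr Iff.rfl (by omega)

-- getD through one instruction's nested loops
theorem pv_getD_step (t : String × Int × Int × Int × Int)
    (d : Std.HashMap (Int × Int) Int) (cell : Int × Int) :
    (pvStepA d t).getD cell 0 = pvStepC cell (d.getD cell 0) t := by
  obtain ⟨inst, x1, y1, x2, y2⟩ := t
  rw [pv_stepA_eq]
  by_cases h1 : inst = "toggle"
  · subst h1
    rw [if_pos rfl, pv_getD_nested]
    simp [pvStepC]
  · by_cases h2 : inst = "turn on"
    · subst h2
      rw [if_neg (by decide), if_pos rfl, pv_getD_nested]
      simp [pvStepC]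
    · by_cases h3 : inst = "turn off"
      · subst h3
        rw [if_neg (by decide), if_neg (by decide), if_pos rfl, pv_getD_nested]
        simp only [pvStepC]
        split_ifs <;> first | rfl | omega | simp_all
      · rw [if_neg h1, if_neg h2, if_neg h3]
        simp only [pvStepC, h1, h2, h3, false_and, if_false]
        split_ifs <;> rfl

-- membership through one instruction
theorem pv_mem_step (t : String × Int × Int × Int × Int)
    (d : Std.HashMap (Int × Int) Int) (cell : Int × Int) :
    (cell ∈ pvStepA d t) ↔ cell ∈ d ∨ pvTouch t cell := by
  obtain ⟨inst, x1, y1, x2, y2⟩ := t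
  rw [pv_stepA_eq]
  simp only [pvTouch]
  by_cases h1 : inst = "toggle"
  · subst h1
    rw [if_pos rfl]
    simp [pv_mem_nested]
  · by_cases h2 : inst = "turn on"
    · subst h2
      rw [if_neg (by decide), if_pos rfl]
      simp [pv_mem_nested]
    · by_cases h3 : inst = "turn off"
      · subst h3
        rw [if_neg (by decide), if_neg (by decide), if_pos rfl]
        simp [pv_mem_nested]
      · rw [if_neg h1, if_neg h2, if_neg h3]
        simp [h1, h2, h3]

theorem pv_getD_loop (l : List (String × Int × Int × Int × Int))
    (d : Std.HashMap (Int × Int) Int) (cell : Int × Int) :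
    (l.foldl pvStepA d).getD cell 0 = l.foldl (pvStepC cell) (d.getD cell 0) := by
  induction l generalizing d with
  | nil => rfl
  | cons t ts ih => simp only [List.foldl_cons]; rw [ih, pv_getD_step]

theorem pv_mem_loop (l : List (String × Int × Int × Int × Int))
    (d : Std.HashMap (Int × Int) Int) (cell : Int × Int) :
    (cell ∈ l.foldl pvStepA d) ↔ cell ∈ d ∨ ∃ t ∈ l, pvTouch t cell := by
  induction l generalizing d with
  | nil => simp
  | cons t ts ih =>
    simp only [List.foldl_cons, ih, pv_mem_step, List.mem_cons]
    constructor
    · rintro ((h | h) | h)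
      · exact Or.inl h
      · exact Or.inr ⟨t, Or.inl rfl, h⟩
      · rcases h with ⟨u, hu, ht⟩; exact Or.inr ⟨u, Or.inr hu, ht⟩
    · rintro (h | ⟨u, (rfl | hu), ht⟩)
      · exact Or.inl (Or.inl h)
      · exact Or.inl (Or.inr ht)
      · exact Or.inr ⟨u, hu, ht⟩

-- ---------- B side: properties of the compressed coordinate lists ----------

-- a cell untouched by every instruction keeps brightness 0
theorem pv_value_zero (input : List (String × Int × Int × Int × Int)) (cell : Int × Int)
    (h : ∀ t ∈ input, ¬ pvTouch t cell) : pvValue cell input = 0 := by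
  have hstep : ∀ v, ∀ t ∈ input, pvStepC cell v t = v := by
    intro v t ht
    have := h t ht
    obtain ⟨inst, x1, y1, x2, y2⟩ := t
    simp only [pvTouch, not_and_or] at this
    simp only [pvStepC]
    split_ifs with hc h1 h2 h3 <;> first | rfl | (exfalso; tauto)
  unfold pvValue
  induction input with
  | nil => rfl
  | cons t ts ih =>
    simp only [List.foldl_cons]
    rw [hstep 0 t (List.mem_cons_self), ih (fun u hu => h u (List.mem_cons_of_mem _ hu))
      (fun v u hu => hstep v u (List.mem_cons_of_mem _ hu))]

-- the sorted coordinate lists are strictly increasing and carry exactly the edge coordinates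
-- Pairwise ≤ (sortedness) plus Nodup gives strict increase
theorem pv_sorted_union_lt (s t : List Int) :
    (PySem.List.sorted (PySem.Set.union (PySem.Set.ofList s) (PySem.Set.ofList t))
      (fun x => x) false).Pairwise (· < ·) := by
  have hle := PySem.List.sorted_pairwise (PySem.Set.union (PySem.Set.ofList s) (PySem.Set.ofList t)) (fun x => x)
  have hnd : (PySem.List.sorted (PySem.Set.union (PySem.Set.ofList s) (PySem.Set.ofList t))
      (fun x => x) false).Nodup :=
    (PySem.List.sorted_perm _ _ _).nodup_iff.mpr
      (PySem.Set.nodup_union _ _ (PySem.Set.nodup_ofList s))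
  have := List.Pairwise.and hle (by simpa [List.Nodup] using hnd)
  exact this.imp (fun ⟨a, b⟩ => lt_of_le_of_ne a b)

theorem pv_xs_sorted (input : List (String × Int × Int × Int × Int)) :
    (pvXs input).Pairwise (· < ·) := pv_sorted_union_lt _ _

theorem pv_ys_sorted (input : List (String × Int × Int × Int × Int)) :
    (pvYs input).Pairwise (· < ·) := pv_sorted_union_lt _ _

theorem pv_mem_xs (input : List (String × Int × Int × Int × Int)) (a : Int) :
    a ∈ pvXs input ↔ (∃ t ∈ input, t.2.1 = a) ∨ (∃ t ∈ input, t.2.2.2.1 + 1 = a) := by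
  rw [pvXs, PySem.List.mem_sorted, PySem.Set.mem_union]
  simp [PySem.Set.mem_ofList]

theorem pv_mem_ys (input : List (String × Int × Int × Int × Int)) (a : Int) :
    a ∈ pvYs input ↔ (∃ t ∈ input, t.2.2.1 = a) ∨ (∃ t ∈ input, t.2.2.2.2 + 1 = a) := by
  rw [pvYs, PySem.List.mem_sorted, PySem.Set.mem_union]
  simp [PySem.Set.mem_ofList]

-- ---------- index arithmetic on a strictly increasing list ----------

theorem pv_getD_lt (xs : List Int) (h : xs.Pairwise (· < ·)) {i j : Nat} (hij : i < j)
    (hj : j < xs.length) : xs.getD i 0 < xs.getD j 0 := by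
  rw [List.getD_eq_getElem xs 0 (lt_trans hij hj), List.getD_eq_getElem xs 0 hj]
  exact List.pairwise_iff_getElem.mp h i j _ _ hij

theorem pv_getD_mono (xs : List Int) (h : xs.Pairwise (· < ·)) {i j : Nat} (hij : i ≤ j)
    (hj : j < xs.length) : xs.getD i 0 ≤ xs.getD j 0 := by
  rcases Nat.lt_or_ge i j with hlt | hge
  · exact le_of_lt (pv_getD_lt xs h hlt hj)
  · have : i = j := by omega
    subst this; rfl

-- an element of the list never lies strictly between two consecutive entries
theorem pv_gap (xs : List Int) (h : xs.Pairwise (· < ·)) {a : Int} (ha : a ∈ xs) {i : Nat}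
    (hi : i + 1 < xs.length) : a ≤ xs.getD i 0 ∨ xs.getD (i + 1) 0 ≤ a := by
  obtain ⟨k, hk, hke⟩ := List.mem_iff_getElem.mp ha
  rw [← List.getD_eq_getElem xs 0 hk] at hke
  subst hke
  by_cases hki : k ≤ i
  · exact Or.inl (pv_getD_mono xs h hki (by omega))
  · exact Or.inr (pv_getD_mono xs h (by omega) hk)

-- a value between the first entry and entry k lies in some gap [X i, X (i+1))
theorem pv_bracket (xs : List Int) (r : Int) :
    ∀ k : Nat, k < xs.length → xs.getD 0 0 ≤ r → r < xs.getD k 0 →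
      ∃ i, i + 1 ≤ k ∧ xs.getD i 0 ≤ r ∧ r < xs.getD (i + 1) 0 := by
  intro k
  induction k with
  | zero => intro _ h1 h2; omega
  | succ k ih =>
    intro hk h1 h2
    by_cases hc : xs.getD k 0 ≤ r
    · exact ⟨k, le_refl _, hc, h2⟩
    · obtain ⟨i, hi, h3, h4⟩ := ih (by omega) h1 (by omega)
      exact ⟨i, by omega, h3, h4⟩

-- all cells of one compressed block end at the same brightness as the block's representative
theorem pv_value_uniform (input : List (String × Int × Int × Int × Int)) (i j : Nat)
    (hi : i + 1 < (pvXs input).length) (hj : j + 1 < (pvYs input).length)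
    (r c : Int) (hr1 : (pvXs input).getD i 0 ≤ r) (hr2 : r < (pvXs input).getD (i + 1) 0)
    (hc1 : (pvYs input).getD j 0 ≤ c) (hc2 : c < (pvYs input).getD (j + 1) 0) :
    pvValue (r, c) input = pvValue ((pvXs input).getD i 0, (pvYs input).getD j 0) input := by
  unfold pvValue
  apply PySem.List.foldl_congr_mem _ _ _ _
  intro v t ht
  obtain ⟨inst, x1, y1, x2, y2⟩ := t
  have hx1 : x1 ≤ (pvXs input).getD i 0 ∨ (pvXs input).getD (i + 1) 0 ≤ x1 :=
    pv_gap _ (pv_xs_sorted input) ((pv_mem_xs input x1).mpr (Or.inl ⟨_, ht, rfl⟩)) hi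
  have hx2 : x2 + 1 ≤ (pvXs input).getD i 0 ∨ (pvXs input).getD (i + 1) 0 ≤ x2 + 1 :=
    pv_gap _ (pv_xs_sorted input) ((pv_mem_xs input (x2 + 1)).mpr (Or.inr ⟨_, ht, rfl⟩)) hi
  have hy1 : y1 ≤ (pvYs input).getD j 0 ∨ (pvYs input).getD (j + 1) 0 ≤ y1 :=
    pv_gap _ (pv_ys_sorted input) ((pv_mem_ys input y1).mpr (Or.inl ⟨_, ht, rfl⟩)) hj
  have hy2 : y2 + 1 ≤ (pvYs input).getD j 0 ∨ (pvYs input).getD (j + 1) 0 ≤ y2 + 1 :=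
    pv_gap _ (pv_ys_sorted input) ((pv_mem_ys input (y2 + 1)).mpr (Or.inr ⟨_, ht, rfl⟩)) hj
  simp only [pvStepC]
  exact if_congr (by omega) rfl rfl

-- B's double loop is a double sum over the block indices
theorem pv_sum_range (N : Nat) (f : Nat → Int) :
    ((List.range N).map f).sum = ∑ k ∈ Finset.range N, f k := by
  rw [← List.toFinset_range, List.sum_toFinset f List.nodup_range]

theorem pv_alt_eq (input : List (String × Int × Int × Int × Int)) :
    d6_p2_alt input =
      ∑ p ∈ (Finset.range ((pvXs input).length - 1)) ×ˢ (Finset.range ((pvYs input).length - 1)),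
        pvValue ((pvXs input).getD p.1 0, (pvYs input).getD p.2 0) input *
          ((pvXs input).getD (p.1 + 1) 0 - (pvXs input).getD p.1 0) *
          ((pvYs input).getD (p.2 + 1) 0 - (pvYs input).getD p.2 0) := by
  unfold d6_p2_alt
  simp only [PySem.List.len_eq, PySem.List.foldl_add, PySem.List.pyRange_one, List.map_map,
    zero_add, sub_zero]
  simp only [Function.comp_def, ← Nat.cast_add_one, PySem.List.pyGetD_natCast]
  have hx : ((((pvXs input).length : Int)) - 1).toNat = (pvXs input).length - 1 := by omega
  have hy : ((((pvYs input).length : Int)) - 1).toNat = (pvYs input).length - 1 := by omega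
  rw [hx, hy, Finset.sum_product]
  rw [pv_sum_range]
  refine Finset.sum_congr rfl ?_
  intro i _
  rw [pv_sum_range]

-- ===== VERDICT (by name: the statement is the Claim_ definition above) =====
theorem d6_p2_spec : Claim_equal_d6_p2 := by
  intro input _
  unfold Spec_d6_p2 d6_p2
  set grid := input.foldl pvStepA (∅ : Std.HashMap (Int × Int) Int) with hgrid
  set xs := pvXs input with hxs
  set ys := pvYs input with hys
  set n := xs.length with hn
  set m := ys.length with hm
  set val : Int × Int → Int := fun cell => pvValue cell input with hval
  set X : Nat → Int := fun i => xs.getD i 0 with hX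
  set Y : Nat → Int := fun j => ys.getD j 0 with hY
  set P : Finset (Nat × Nat) := (Finset.range (n - 1)) ×ˢ (Finset.range (m - 1)) with hP
  set Blk : Nat × Nat → Finset (Int × Int) :=
    fun p => (Finset.Ico (X p.1) (X (p.1 + 1))) ×ˢ (Finset.Ico (Y p.2) (Y (p.2 + 1))) with hBlk
  have hlenx : (pvXs input).length = n := by rw [hn, hxs]
  have hleny : (pvYs input).length = m := by rw [hm, hys]
  have hXeq : ∀ i, (pvXs input).getD i 0 = X i := by intro i; rw [hX, hxs]
  have hYeq : ∀ j, (pvYs input).getD j 0 = Y j := by intro j; rw [hY, hys]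
  -- A's sum, as a sum over the key list
  rw [Std.HashMap.fold_eq_foldl_toList, PySem.List.foldl_add, zero_add]
  have hsnd : grid.toList.map (fun p => p.2) = grid.toList.map (fun p => val p.1) := by
    refine List.map_congr_left ?_
    intro p hp
    have h2 : grid[p.1]? = some p.2 := by
      rw [← Std.HashMap.mem_toList_iff_getElem?_eq_some]
      exact (Prod.mk.eta (p := p)) ▸ hp
    have hv : grid.getD p.1 0 = p.2 := by
      rw [Std.HashMap.getD_eq_getD_getElem?, h2]; rfl
    rw [← hv, hgrid, pv_getD_loop]
    simp [hval, pvValue, Std.HashMap.getD_empty]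
  rw [hsnd]
  have hkeys : grid.toList.map (fun p => val p.1) = grid.keys.map val := by
    rw [← Std.HashMap.map_fst_toList_eq_keys, List.map_map]
    rfl
  rw [hkeys]
  have hfin : (grid.keys.map val).sum = grid.keys.toFinset.sum val :=
    (List.sum_toFinset val (pv_nodup_keys grid)).symm
  rw [hfin]
  -- the grid's keys are exactly the touched cells; every touched cell lies in one block
  have hmem_grid : ∀ cell, cell ∈ grid ↔ ∃ t ∈ input, pvTouch t cell := by
    intro cell
    rw [hgrid, pv_mem_loop]
    simp [Std.HashMap.not_mem_empty]
  have hsub : grid.keys.toFinset ⊆ P.biUnion Blk := by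
    intro cell hcell
    have hmem : ∃ t ∈ input, pvTouch t cell :=
      (hmem_grid cell).mp (Std.HashMap.mem_keys.mp (List.mem_toFinset.mp hcell))
    obtain ⟨t, ht, htouch⟩ := hmem
    obtain ⟨inst, x1, y1, x2, y2⟩ := t
    simp only [pvTouch] at htouch
    obtain ⟨-, hx1, hx2, hy1, hy2⟩ := htouch
    have hx1m : x1 ∈ xs := (pv_mem_xs input x1).mpr (Or.inl ⟨_, ht, rfl⟩)
    have hx2m : x2 + 1 ∈ xs := (pv_mem_xs input (x2 + 1)).mpr (Or.inr ⟨_, ht, rfl⟩)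
    have hy1m : y1 ∈ ys := (pv_mem_ys input y1).mpr (Or.inl ⟨_, ht, rfl⟩)
    have hy2m : y2 + 1 ∈ ys := (pv_mem_ys input (y2 + 1)).mpr (Or.inr ⟨_, ht, rfl⟩)
    obtain ⟨k1, hk1, hk1e⟩ := List.mem_iff_getElem.mp hx1m
    rw [← List.getD_eq_getElem xs 0 hk1] at hk1e
    obtain ⟨k2, hk2, hk2e⟩ := List.mem_iff_getElem.mp hx2m
    rw [← List.getD_eq_getElem xs 0 hk2] at hk2e
    obtain ⟨l1, hl1, hl1e⟩ := List.mem_iff_getElem.mp hy1m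
    rw [← List.getD_eq_getElem ys 0 hl1] at hl1e
    obtain ⟨l2, hl2, hl2e⟩ := List.mem_iff_getElem.mp hy2m
    rw [← List.getD_eq_getElem ys 0 hl2] at hl2e
    have hlox : xs.getD 0 0 ≤ cell.1 := by
      have := pv_getD_mono xs (pv_xs_sorted input) (Nat.zero_le k1) hk1
      omega
    have hhix : cell.1 < xs.getD (n - 1) 0 := by
      have := pv_getD_mono xs (pv_xs_sorted input) (show k2 ≤ n - 1 by omega) (show n - 1 < n by omega)
      omega
    have hloy : ys.getD 0 0 ≤ cell.2 := by
      have := pv_getD_mono ys (pv_ys_sorted input) (Nat.zero_le l1) hl1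
      omega
    have hhiy : cell.2 < ys.getD (m - 1) 0 := by
      have := pv_getD_mono ys (pv_ys_sorted input) (show l2 ≤ m - 1 by omega) (show m - 1 < m by omega)
      omega
    obtain ⟨i, hi, hXi, hXi1⟩ := pv_bracket xs cell.1 (n - 1) (by omega) hlox hhix
    obtain ⟨j, hj, hYj, hYj1⟩ := pv_bracket ys cell.2 (m - 1) (by omega) hloy hhiy
    refine Finset.mem_biUnion.mpr ⟨(i, j), ?_, ?_⟩
    · rw [hP]
      simp only [Finset.mem_product, Finset.mem_range]
      omega
    · rw [hBlk]
      simp only [Finset.mem_product, Finset.mem_Ico]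
      exact ⟨⟨hXi, hXi1⟩, ⟨hYj, hYj1⟩⟩
  -- a block cell outside the grid keys was never touched: brightness 0
  have hvan : ∀ cell ∈ P.biUnion Blk, cell ∉ grid.keys.toFinset → val cell = 0 := by
    intro cell _ hnot
    apply pv_value_zero
    intro t ht htouch
    exact hnot (List.mem_toFinset.mpr (Std.HashMap.mem_keys.mpr
      ((hmem_grid cell).mpr ⟨t, ht, htouch⟩)))
  rw [Finset.sum_subset hsub hvan]
  -- the blocks are pairwise disjoint rectangles
  have hdisj : (P : Set (Nat × Nat)).PairwiseDisjoint Blk := by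
    intro p hp q hq hpq
    simp only [Finset.coe_product, Set.mem_prod, Finset.mem_coe, Finset.mem_range, hP] at hp hq
    apply Finset.disjoint_left.mpr
    intro cell hcp hcq
    rw [hBlk] at hcp hcq
    simp only [Finset.mem_product, Finset.mem_Ico] at hcp hcq
    have hne : p.1 ≠ q.1 ∨ p.2 ≠ q.2 := by
      by_contra hcon
      push Not at hcon
      exact hpq (Prod.ext hcon.1 hcon.2)
    rcases hne with h | h
    · rcases Nat.lt_or_ge p.1 q.1 with hlt | hge
      · have := pv_getD_mono xs (pv_xs_sorted input) (show p.1 + 1 ≤ q.1 by omega)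
          (show q.1 < n by omega)
        simp only [hX] at hcp hcq
        omega
      · have := pv_getD_mono xs (pv_xs_sorted input) (show q.1 + 1 ≤ p.1 by omega)
          (show p.1 < n by omega)
        simp only [hX] at hcp hcq
        omega
    · rcases Nat.lt_or_ge p.2 q.2 with hlt | hge
      · have := pv_getD_mono ys (pv_ys_sorted input) (show p.2 + 1 ≤ q.2 by omega)
          (show q.2 < m by omega)
        simp only [hY] at hcp hcq
        omega
      · have := pv_getD_mono ys (pv_ys_sorted input) (show q.2 + 1 ≤ p.2 by omega)
          (show p.2 < m by omega)
        simp only [hY] at hcp hcq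
        omega
  rw [Finset.sum_biUnion hdisj]
  -- each block sums to its representative value times its area
  have hblock : ∀ p ∈ P, (Blk p).sum val =
      val (X p.1, Y p.2) * (X (p.1 + 1) - X p.1) * (Y (p.2 + 1) - Y p.2) := by
    intro p hp
    rw [hP] at hp
    simp only [Finset.mem_product, Finset.mem_range] at hp
    have hxlt : X p.1 < X (p.1 + 1) :=
      pv_getD_lt xs (pv_xs_sorted input) (Nat.lt_succ_self _) (by omega)
    have hylt : Y p.2 < Y (p.2 + 1) :=
      pv_getD_lt ys (pv_ys_sorted input) (Nat.lt_succ_self _) (by omega)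
    have huni : ∀ cell ∈ Blk p, val cell = val (X p.1, Y p.2) := by
      intro cell hcell
      rw [hBlk] at hcell
      simp only [Finset.mem_product, Finset.mem_Ico] at hcell
      have := pv_value_uniform input p.1 p.2 (by omega) (by omega) cell.1 cell.2
        (by rw [hXeq]; exact hcell.1.1) (by rw [hXeq]; exact hcell.1.2)
        (by rw [hYeq]; exact hcell.2.1) (by rw [hYeq]; exact hcell.2.2)
      simp only [hval]
      simp only [Prod.mk.eta] at this
      rw [this]
    rw [Finset.sum_congr rfl huni, Finset.sum_const, hBlk]
    simp only [Finset.card_product, Int.card_Ico]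
    rw [nsmul_eq_mul]
    push_cast [Int.toNat_of_nonneg (by omega : (0:Int) ≤ X (p.1 + 1) - X p.1),
      Int.toNat_of_nonneg (by omega : (0:Int) ≤ Y (p.2 + 1) - Y p.2)]
    ring
  rw [Finset.sum_congr rfl hblock, pv_alt_eq]
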